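-- pv_equiv track=rewrite | github.com/wilmurillo-ai/Design-Assistant | .skills/openclaw-skills/skills/fwwdn/skills-publish/scripts/check_publish_ready.py | fold_block_lines
-- ===== SOURCE A (Python) =====
-- def fold_block_lines(lines: list[str], style: str) -> str:
--     if style == "|":
--         return "\n".join(lines).rstrip()
--     paragraphs: list[str] = []
--     current: list[str] = []
--     for line in lines:
--         if line.strip():
--             current.append(line.strip())
--             continue
--         if current:
--             paragraphs.append(" ".join(current))
--             current = []
--         paragraphs.append("")
--     if current:
--         paragraphs.append(" ".join(current))
--     return "\n".join(paragraphs).rstrip()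
-- ===== SOURCE B (Python) =====
-- def fold_block_lines(lines: list[str], style: str) -> str:
--     if style == "|":
--         return "\n".join(lines).rstrip()
--     return "\n".join(_paragraph_runs(lines)).rstrip()
--
--
-- def _paragraph_runs(lines: list[str]) -> list[str]:
--     # Recursive run decomposition: a maximal run of non-blank lines becomes one
--     # space-joined paragraph; each blank line becomes one empty string.
--     if not lines:
--         return []
--     if lines[0].strip():
--         i = 0
--         while i < len(lines) and lines[i].strip():
--             i += 1
--         return [" ".join(l.strip() for l in lines[:i])] + _paragraph_runs(lines[i:])
--     return [""] + _paragraph_runs(lines[1:])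
-- ===== Notes on version B (the rewrite author's own statement) =====
-- stated objective: simpler
-- what changed: Replaced the single-pass loop with mutable paragraph/current accumulators and a post-loop flush by a recursive run decomposition: each maximal non-blank run is taken and joined in one step, each blank line yields one empty string, so no accumulator state or final flush is needed.
import Mathlib
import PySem

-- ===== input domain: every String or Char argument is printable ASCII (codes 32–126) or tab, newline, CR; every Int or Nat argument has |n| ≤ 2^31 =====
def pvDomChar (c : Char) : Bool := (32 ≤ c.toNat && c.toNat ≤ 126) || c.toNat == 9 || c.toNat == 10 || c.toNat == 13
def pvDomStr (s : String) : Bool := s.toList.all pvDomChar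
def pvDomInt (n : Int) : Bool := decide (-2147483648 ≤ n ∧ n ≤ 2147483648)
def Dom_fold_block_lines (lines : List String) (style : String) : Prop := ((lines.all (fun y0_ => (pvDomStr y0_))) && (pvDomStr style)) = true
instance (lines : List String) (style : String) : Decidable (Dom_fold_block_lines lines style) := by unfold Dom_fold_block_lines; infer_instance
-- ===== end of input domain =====

-- B replaces A's accumulator loop with a recursive run decomposition (simpler: no pending-paragraph state or post-loop flush).

-- ===== PORT A =====
def fold_block_lines (lines : List String) (style : String) : String :=
  if style = "|" then PySem.Str.rstrip (PySem.Str.join "\n" lines)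
  else
    -- the loop over lines, state = (paragraphs, current)
    let st := lines.foldl (fun (st : List String × List String) line =>
      if PySem.Str.strip line ≠ "" then (st.1, st.2 ++ [PySem.Str.strip line])
      else if st.2 ≠ [] then (st.1 ++ [PySem.Str.join " " st.2, ""], ([] : List String))
      else (st.1 ++ [""], [])) ([], [])
    let paragraphs := if st.2 ≠ [] then st.1 ++ [PySem.Str.join " " st.2] else st.1
    PySem.Str.rstrip (PySem.Str.join "\n" paragraphs)

-- ===== PORT B =====
-- _paragraph_runs: a maximal run of non-blank lines → one space-joined paragraph; a blank line → one "".
def paragraphRuns (lines : List String) : List String :=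
  match lines with
  | [] => []
  | l :: rest =>
    if h : PySem.Str.strip l ≠ "" then
      PySem.Str.join " "
          (((l :: rest).takeWhile (fun x => PySem.Str.strip x != "")).map PySem.Str.strip) ::
        paragraphRuns ((l :: rest).dropWhile (fun x => PySem.Str.strip x != ""))
    else
      "" :: paragraphRuns rest
termination_by lines.length
decreasing_by
  · rw [List.dropWhile_cons, if_pos (by simpa using h)]
    exact Nat.lt_succ_of_le (rest.length_dropWhile_le _)
  · simp

def fold_block_lines_alt (lines : List String) (style : String) : String :=
  if style = "|" then PySem.Str.rstrip (PySem.Str.join "\n" lines)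
  else PySem.Str.rstrip (PySem.Str.join "\n" (paragraphRuns lines))

-- ===== PRECONDITION & SPEC =====
def Spec_fold_block_lines (lines : List String) (style : String) (out : String) : Prop := out = fold_block_lines_alt lines style
instance (lines : List String) (style : String) (out : String) : Decidable (Spec_fold_block_lines lines style out) := by unfold Spec_fold_block_lines; infer_instance

-- ===== CLAIM (what is proved, stated in full; the proofs are below) =====
def Claim_equal_fold_block_lines : Prop := ∀ (lines : List String) (style : String), Dom_fold_block_lines lines style → Spec_fold_block_lines lines style (fold_block_lines lines style)

-- ===== LEMMAS AND PROOFS =====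

-- A's remaining paragraphs, given words `cur` already pending in `current`.
def partsWith (cur : List String) (lines : List String) : List String :=
  match lines with
  | [] => if cur ≠ [] then [PySem.Str.join " " cur] else []
  | l :: rest =>
    if PySem.Str.strip l ≠ "" then partsWith (cur ++ [PySem.Str.strip l]) rest
    else (if cur ≠ [] then [PySem.Str.join " " cur] else []) ++ "" :: partsWith [] rest

theorem foldl_partsWith (lines : List String) : ∀ (paras cur : List String),
    (let st := lines.foldl (fun (st : List String × List String) line =>
      if PySem.Str.strip line ≠ "" then (st.1, st.2 ++ [PySem.Str.strip line])
      else if st.2 ≠ [] then (st.1 ++ [PySem.Str.join " " st.2, ""], ([] : List String))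
      else (st.1 ++ [""], [])) (paras, cur)
     if st.2 ≠ [] then st.1 ++ [PySem.Str.join " " st.2] else st.1)
    = paras ++ partsWith cur lines := by
  induction lines with
  | nil => intro paras cur; by_cases h : cur = [] <;> simp [partsWith, h]
  | cons l rest ih =>
    intro paras cur
    rw [List.foldl_cons]
    by_cases h : PySem.Str.strip l = ""
    · by_cases hc : cur = []
      · rw [show (if PySem.Str.strip l ≠ "" then ((paras, cur).1, (paras, cur).2 ++ [PySem.Str.strip l])
          else if (paras, cur).2 ≠ [] then ((paras, cur).1 ++ [PySem.Str.join " " (paras, cur).2, ""], ([] : List String))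
          else ((paras, cur).1 ++ [""], [])) = (paras ++ [""], ([] : List String))
          from by simp [h, hc]]
        rw [ih]
        simp [partsWith, h, hc, List.append_assoc]
      · rw [show (if PySem.Str.strip l ≠ "" then ((paras, cur).1, (paras, cur).2 ++ [PySem.Str.strip l])
          else if (paras, cur).2 ≠ [] then ((paras, cur).1 ++ [PySem.Str.join " " (paras, cur).2, ""], ([] : List String))
          else ((paras, cur).1 ++ [""], []))
            = (paras ++ [PySem.Str.join " " cur, ""], ([] : List String))
          from by simp [h, hc]]
        rw [ih]
        simp [partsWith, h, hc, List.append_assoc]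
    · rw [show (if PySem.Str.strip l ≠ "" then ((paras, cur).1, (paras, cur).2 ++ [PySem.Str.strip l])
          else if (paras, cur).2 ≠ [] then ((paras, cur).1 ++ [PySem.Str.join " " (paras, cur).2, ""], ([] : List String))
          else ((paras, cur).1 ++ [""], [])) = (paras, cur ++ [PySem.Str.strip l])
        from by simp [h]]
      rw [ih]
      rw [partsWith, if_pos (by simpa using h)]

theorem partsWith_run (lines : List String) : ∀ (cur : List String), cur ≠ [] →
    partsWith cur lines =
      PySem.Str.join " " (cur ++ (lines.takeWhile (fun x => PySem.Str.strip x != "")).map PySem.Str.strip) ::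
        partsWith [] (lines.dropWhile (fun x => PySem.Str.strip x != "")) := by
  induction lines with
  | nil => intro cur hc; simp [partsWith, hc]
  | cons l rest ih =>
    intro cur hc
    by_cases h : PySem.Str.strip l = ""
    · simp [partsWith, h, hc]
    · rw [partsWith, if_pos (by simpa using h)]
      rw [ih (cur ++ [PySem.Str.strip l]) (by simp)]
      simp [h, List.append_assoc]

theorem paragraphRuns_eq (lines : List String) : paragraphRuns lines = partsWith [] lines := by
  induction lines using paragraphRuns.induct with
  | case1 => simp [paragraphRuns, partsWith]
  | case2 l rest h ih =>
    rw [paragraphRuns, dif_pos h, ih, partsWith, if_pos h]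
    simp only [List.nil_append]
    rw [partsWith_run _ [PySem.Str.strip l] (by simp)]
    rw [List.takeWhile_cons, if_pos (by simpa using h), List.dropWhile_cons,
        if_pos (by simpa using h)]
    simp
  | case3 l rest h ih =>
    rw [paragraphRuns, dif_neg h, ih, partsWith, if_neg h]
    simp

-- ===== VERDICT (by name: the statement is the Claim_ definition above) =====
theorem fold_block_lines_spec : Claim_equal_fold_block_lines := by
  intro lines style _
  unfold Spec_fold_block_lines fold_block_lines fold_block_lines_alt
  by_cases hs : style = "|"
  · simp [hs]
  · simp only [if_neg hs]
    rw [paragraphRuns_eq]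
    have := foldl_partsWith lines [] []
    simp only at this
    rw [this]
    simp [partsWith]
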